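-- pv_equiv track=rewrite | github.com/AdonisPhusis/BATHRON | contrib/dex/sdk/lot_sizes.py | split_amount
-- ===== SOURCE A (Python) =====
-- from typing import List, Tuple
--
-- STANDARD_SIZES: List[int] = [10000, 1000, 100, 10, 1]
--
-- def split_amount(amount: int) -> List[int]:
--     """
--     Split amount into standard lot sizes using greedy algorithm.
--
--     The greedy approach works optimally for our size set {1, 10, 100, 1000, 10000}
--     because each size is a multiple of 10 of the previous one.
--
--     Args:
--         amount: Integer KPIV amount to split
--
--     Returns:
--         List of standard lot sizes that sum to amount
--
--     Raises:
--         ValueError: If amount is not positive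
--
--     Examples:
--         >>> split_amount(55)
--         [10, 10, 10, 10, 10, 1, 1, 1, 1, 1]
--
--         >>> split_amount(1234)
--         [1000, 100, 100, 10, 10, 10, 1, 1, 1, 1]
--
--         >>> split_amount(10000)
--         [10000]
--
--         >>> split_amount(100)
--         [100]
--     """
--     if not isinstance(amount, int):
--         raise TypeError(f"Amount must be integer, got {type(amount)}")
--     if amount <= 0:
--         raise ValueError(f"Amount must be positive, got {amount}")
--
--     lots = []
--     remaining = amount
--
--     for size in STANDARD_SIZES:
--         while remaining >= size:
--             lots.append(size)
--             remaining -= size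
--
--     # Should never happen with our size set (1 is included)
--     if remaining != 0:
--         raise ValueError(f"Cannot split {amount} into standard sizes (remaining: {remaining})")
--
--     return lots
-- ===== SOURCE B (Python) =====
-- from typing import List
--
-- STANDARD_SIZES: List[int] = [10000, 1000, 100, 10, 1]
--
-- def split_amount(amount: int) -> List[int]:
--     if not isinstance(amount, int):
--         raise TypeError(f"Amount must be integer, got {type(amount)}")
--     if amount <= 0:
--         raise ValueError(f"Amount must be positive, got {amount}")
--
--     lots = []
--     remaining = amount
--     for size in STANDARD_SIZES:
--         count, remaining = divmod(remaining, size)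
--         lots.extend([size] * count)
--
--     if remaining != 0:
--         raise ValueError(f"Cannot split {amount} into standard sizes (remaining: {remaining})")
--
--     return lots
-- ===== Notes on version B (the rewrite author's own statement) =====
-- stated objective: simpler
-- what changed: The inner while-loop that subtracts one lot at a time is replaced by a single divmod per size, extending the result with [size]*count, so each bucket's count is computed arithmetically in one step.
import Mathlib
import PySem

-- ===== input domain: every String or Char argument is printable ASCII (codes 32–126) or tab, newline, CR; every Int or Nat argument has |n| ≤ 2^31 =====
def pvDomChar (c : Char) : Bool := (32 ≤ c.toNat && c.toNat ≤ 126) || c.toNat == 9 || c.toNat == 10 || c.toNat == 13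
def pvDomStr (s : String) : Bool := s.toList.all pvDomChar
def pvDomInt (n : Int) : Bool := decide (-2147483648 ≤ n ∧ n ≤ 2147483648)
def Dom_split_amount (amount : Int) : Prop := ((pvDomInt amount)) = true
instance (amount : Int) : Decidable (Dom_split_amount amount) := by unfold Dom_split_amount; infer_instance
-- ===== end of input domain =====

-- B replaces A's one-lot-at-a-time inner while-subtraction by a single divmod per size (simpler).

-- ===== PORT A =====
-- inner 'while remaining >= size: lots.append(size); remaining -= size'
-- fuel = remaining.toNat makes it total; within Pre_ (size ≥ 1) the fuel never runs out.
def aWhile (size : Int) : Int → List Int → Nat → List Int × Int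
  | remaining, lots, fuel =>
    if size ≤ remaining then
      match fuel with
      | 0 => (lots, remaining)          -- unreachable for size ≥ 1, 0 ≤ remaining
      | Nat.succ fuel' => aWhile size (remaining - size) (lots ++ [size]) fuel'
    else (lots, remaining)

def split_amount (amount : Int) : List Int :=
  let st := [(10000 : Int), 1000, 100, 10, 1].foldl
    (fun (st : List Int × Int) size => aWhile size st.2 st.1 st.2.toNat)
    ([], amount)
  st.1

-- ===== PORT B =====
def split_amount_alt (amount : Int) : List Int :=
  let st := [(10000 : Int), 1000, 100, 10, 1].foldl
    (fun (st : List Int × Int) size =>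
      let c := PySem.Int.floordiv st.2 size
      let r := PySem.Int.mod st.2 size
      (st.1 ++ List.replicate c.toNat size, r))
    ([], amount)
  st.1

-- ===== PRECONDITION & SPEC =====
-- A raises ValueError for amount ≤ 0; those inputs are excluded.
def Pre_split_amount (amount : Int) : Prop := 0 < amount
instance (amount : Int) : Decidable (Pre_split_amount amount) := by unfold Pre_split_amount; infer_instance
def pvWitness_split_amount : Int := (1234)

def Spec_split_amount (amount : Int) (out : List Int) : Prop := out = split_amount_alt amount
instance (amount : Int) (out : List Int) : Decidable (Spec_split_amount amount out) := by unfold Spec_split_amount; infer_instance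

-- ===== CLAIM (what is proved, stated in full; the proofs are below) =====
def Claim_equal_split_amount : Prop := ∀ (amount : Int), Dom_split_amount amount → Pre_split_amount amount → Spec_split_amount amount (split_amount amount)

-- ===== LEMMAS AND PROOFS =====

-- A's while-loop, given enough fuel, equals B's divmod step.
theorem aWhile_eq (size : Int) (hs : 0 < size) :
    ∀ (fuel : Nat) (remaining : Int) (lots : List Int),
      0 ≤ remaining → remaining.toNat ≤ fuel →
      aWhile size remaining lots fuel
        = (lots ++ List.replicate (PySem.Int.floordiv remaining size).toNat size,
           PySem.Int.mod remaining size) := by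
  intro fuel
  induction fuel with
  | zero =>
    intro remaining lots h0 hf
    have hr : remaining = 0 := by omega
    subst hr
    simp [aWhile, hs.not_ge, PySem.Int.floordiv, PySem.Int.mod, Int.fdiv, Int.fmod]
  | succ n ih =>
    intro remaining lots h0 hf
    rw [PySem.Int.floordiv_eq_ediv_of_pos hs, PySem.Int.mod_eq_emod_of_pos hs]
    by_cases h : size ≤ remaining
    · rw [aWhile]
      simp only [h, if_true]
      rw [ih (remaining - size) (lots ++ [size]) (by omega) (by omega)]
      rw [PySem.Int.floordiv_eq_ediv_of_pos hs, PySem.Int.mod_eq_emod_of_pos hs]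
      have hd : remaining / size = (remaining - size) / size + 1 := by
        have := Int.add_mul_ediv_right (remaining - size) 1 (by omega : size ≠ 0)
        simp at this
        omega
      have hm : remaining % size = (remaining - size) % size :=
        (Int.sub_emod_right remaining size).symm
      have hq0 : 0 ≤ (remaining - size) / size := Int.ediv_nonneg (by omega) (by omega)
      rw [hd, hm]
      congr 1
      have : (((remaining - size) / size) + 1).toNat = ((remaining - size) / size).toNat + 1 := by omega
      rw [this, List.replicate_succ, List.append_assoc]
      simp
    · rw [aWhile]
      simp only [h, if_false]
      have hq : remaining / size = 0 := Int.ediv_eq_zero_of_lt h0 (by omega)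
      have hm : remaining % size = remaining := Int.emod_eq_of_lt h0 (by omega)
      simp [hq, hm]

theorem step_eq (size : Int) (hs : 0 < size) (remaining : Int) (lots : List Int)
    (h0 : 0 ≤ remaining) :
    aWhile size remaining lots remaining.toNat
      = (lots ++ List.replicate (PySem.Int.floordiv remaining size).toNat size,
         PySem.Int.mod remaining size) :=
  aWhile_eq size hs remaining.toNat remaining lots h0 le_rfl

-- ===== VERDICT (by name: the statement is the Claim_ definition above) =====
theorem split_amount_spec : Claim_equal_split_amount := by
  intro amount _ hpre
  unfold Spec_split_amount split_amount split_amount_alt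
  simp only [List.foldl]
  have h0 : (0:Int) ≤ amount := le_of_lt hpre
  rw [step_eq 10000 (by norm_num) amount [] h0]
  have h1 : (0:Int) ≤ PySem.Int.mod amount 10000 := PySem.Int.mod_nonneg _ (by norm_num)
  rw [step_eq 1000 (by norm_num) _ _ h1]
  have h2 : (0:Int) ≤ PySem.Int.mod (PySem.Int.mod amount 10000) 1000 := PySem.Int.mod_nonneg _ (by norm_num)
  rw [step_eq 100 (by norm_num) _ _ h2]
  have h3 := PySem.Int.mod_nonneg (PySem.Int.mod (PySem.Int.mod amount 10000) 1000) (show (0:Int) < 100 by norm_num)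
  rw [step_eq 10 (by norm_num) _ _ h3]
  have h4 := PySem.Int.mod_nonneg (PySem.Int.mod (PySem.Int.mod (PySem.Int.mod amount 10000) 1000) 100) (show (0:Int) < 10 by norm_num)
  rw [step_eq 1 (by norm_num) _ _ h4]
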